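-- pv_equiv track=rewrite | github.com/Weenkus/Phylo-research | scripts/SHC/Clusterer.py | create_genome_name_key_dictionary
-- ===== SOURCE A (Python) =====
-- def create_genome_name_key_dictionary(genomeNames):
--     d = {}
--     i = 0
--     for v in genomeNames:
--         if i == 0:
--             name = v
--         if i == 2:
--             d[v.split(" ")[0]] = name
--         if i == 3:
--             i = -1
--         i += 1
--
--     return d
-- ===== SOURCE B (Python) =====
-- def create_genome_name_key_dictionary(genomeNames):
--     names = list(genomeNames)
--     d = {}
--     for j in range(2, len(names), 4):
--         d[names[j].split(" ")[0]] = names[j - 2]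
--     return d
-- ===== Notes on version B (the rewrite author's own statement) =====
-- stated objective: simpler
-- what changed: Replaces A's stateful modulo-4 counter loop (with the carried 'name' variable) by a direct index loop over range(2, len(names), 4) that reads names[j] and names[j-2]; materialises the input with list() to support indexing.
import Mathlib
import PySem

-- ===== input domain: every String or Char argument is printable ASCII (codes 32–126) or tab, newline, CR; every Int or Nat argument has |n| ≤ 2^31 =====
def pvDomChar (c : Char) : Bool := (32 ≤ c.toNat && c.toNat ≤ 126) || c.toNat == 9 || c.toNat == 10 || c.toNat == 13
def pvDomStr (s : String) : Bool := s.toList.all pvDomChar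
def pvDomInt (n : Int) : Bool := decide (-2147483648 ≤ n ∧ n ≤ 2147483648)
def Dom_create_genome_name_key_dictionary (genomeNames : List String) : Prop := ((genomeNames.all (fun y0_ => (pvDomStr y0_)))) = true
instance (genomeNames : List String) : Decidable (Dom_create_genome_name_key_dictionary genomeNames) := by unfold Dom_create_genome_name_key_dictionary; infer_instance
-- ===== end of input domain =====

-- B replaces A's stateful 0..3 counter loop with a direct index loop over range(2, len, 4); same result, simpler.

-- v.split(" ")[0]: split with sep " " is always a non-empty list, so the first branch is the exact value
def pvKeyOf (v : String) : String :=
  match PySem.Str.split? v " " with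
  | some (h :: _) => h
  | _ => ""  -- unreachable: sep ≠ "" so split? is some and non-empty

-- ===== PORT A =====
def create_genome_name_key_dictionary (genomeNames : List String) : List (String × String) :=
  -- state: (d, i, name); Python's 'name' is unbound before the first iteration (where i == 0 sets it),
  -- so the initial "" is never read
  (genomeNames.foldl
    (fun (st : PySem.Dict String String × Int × String) v =>
      let name := if st.2.1 = 0 then v else st.2.2
      let d := if st.2.1 = 2 then st.1.insert (pvKeyOf v) name else st.1
      let i := if st.2.1 = 3 then (-1 : Int) else st.2.1
      (d, i + 1, name))
    (PySem.Dict.empty, 0, "")).1.items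

-- ===== PORT B =====
def create_genome_name_key_dictionary_alt (genomeNames : List String) : List (String × String) :=
  let names := genomeNames
  ((PySem.List.pyRange 2 (PySem.List.len names) 4).foldl
    (fun (d : PySem.Dict String String) j =>
      d.insert (pvKeyOf (PySem.List.pyGetD names j "")) (PySem.List.pyGetD names (j - 2) ""))
    PySem.Dict.empty).items

-- ===== PRECONDITION & SPEC =====
def Spec_create_genome_name_key_dictionary (genomeNames : List String) (out : List (String × String)) : Prop := out = create_genome_name_key_dictionary_alt genomeNames
instance (genomeNames : List String) (out : List (String × String)) : Decidable (Spec_create_genome_name_key_dictionary genomeNames out) := by unfold Spec_create_genome_name_key_dictionary; infer_instance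

-- ===== CLAIM (what is proved, stated in full; the proofs are below) =====
def Claim_equal_create_genome_name_key_dictionary : Prop := ∀ (genomeNames : List String), Dom_create_genome_name_key_dictionary genomeNames → Spec_create_genome_name_key_dictionary genomeNames (create_genome_name_key_dictionary genomeNames)

-- ===== LEMMAS AND PROOFS =====

-- the common description: one (key, value) pair per group of four, when the group's third element exists
def pvGroups : List String → List (String × String)
  | a :: _ :: c :: _ :: rest => (pvKeyOf c, a) :: pvGroups rest
  | [a, _, c] => [(pvKeyOf c, a)]
  | _ => []

def pvIns (d : PySem.Dict String String) (p : String × String) : PySem.Dict String String :=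
  d.insert p.1 p.2

def pvStepA (st : PySem.Dict String String × Int × String) (v : String) :
    PySem.Dict String String × Int × String :=
  let name := if st.2.1 = 0 then v else st.2.2
  let d := if st.2.1 = 2 then st.1.insert (pvKeyOf v) name else st.1
  let i := if st.2.1 = 3 then (-1 : Int) else st.2.1
  (d, i + 1, name)

theorem pvA_groups : ∀ (xs : List String) (d : PySem.Dict String String) (n : String),
    (xs.foldl pvStepA (d, 0, n)).1 = (pvGroups xs).foldl pvIns d
  | [], d, n => rfl
  | [a], d, n => rfl
  | [a, b], d, n => rfl
  | [a, b, c], d, n => rfl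
  | a :: b :: c :: e :: rest, d, n => by
    have hst : pvStepA (pvStepA (pvStepA (pvStepA (d, 0, n) a) b) c) e
        = (d.insert (pvKeyOf c) a, 0, a) := rfl
    show (rest.foldl pvStepA (pvStepA (pvStepA (pvStepA (pvStepA (d, 0, n) a) b) c) e)).1 = _
    rw [hst, pvA_groups rest]
    rfl

theorem pvRange4_nil {a b : Int} (h : b ≤ a) : PySem.List.pyRange a b 4 = [] := by
  rw [PySem.List.pyRange_of_pos a b (by norm_num)]
  simp [show ¬ a < b by omega]

theorem pvRange4_cons {a b : Int} (h : a < b) :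
    PySem.List.pyRange a b 4 = a :: PySem.List.pyRange (a + 4) b 4 := by
  rw [PySem.List.pyRange_of_pos a b (by norm_num),
      PySem.List.pyRange_of_pos (a + 4) b (by norm_num)]
  have hc : (if a < b then ((b - a + 4 - 1) / 4).toNat else 0)
      = (if a + 4 < b then ((b - (a + 4) + 4 - 1) / 4).toNat else 0) + 1 := by
    split_ifs <;> omega
  rw [hc, List.range_succ_eq_map, List.map_cons, List.map_map]
  congr 1
  · push_cast; ring
  · apply List.map_congr_left
    intro k _
    simp only [Function.comp]
    push_cast
    ring

theorem pvGetD_cons {x : String} {xs : List String} {j : Int} (h : 0 ≤ j) {dflt : String} :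
    PySem.List.pyGetD (x :: xs) (j + 1) dflt = PySem.List.pyGetD xs j dflt := by
  simp only [PySem.List.pyGetD, PySem.List.pyGet?, PySem.List.pyIdx?, List.length_cons]
  rw [if_pos (by omega), if_pos h]
  by_cases hlt : j < (xs.length : Int)
  · rw [if_pos (by push_cast; omega), if_pos hlt]
    have ht : (j + 1).toNat = j.toNat + 1 := by omega
    simp [ht]
  · rw [if_neg (by push_cast; omega), if_neg hlt]
    rfl

def pvStepB (names : List String) (d : PySem.Dict String String) (j : Int) :
    PySem.Dict String String :=
  d.insert (pvKeyOf (PySem.List.pyGetD names j "")) (PySem.List.pyGetD names (j - 2) "")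

theorem pvStepB_shift4 (a b c e : String) (rest : List String) (d : PySem.Dict String String)
    (j : Int) (hj : 2 ≤ j) :
    pvStepB (a :: b :: c :: e :: rest) d (j + 4) = pvStepB rest d j := by
  have hkey : PySem.List.pyGetD (a :: b :: c :: e :: rest) (j + 4) ""
      = PySem.List.pyGetD rest j "" := by
    rw [show j + 4 = ((j + 1 + 1) + 1) + 1 by ring,
        pvGetD_cons (by omega), pvGetD_cons (by omega), pvGetD_cons (by omega), pvGetD_cons (by omega)]
  have hval : PySem.List.pyGetD (a :: b :: c :: e :: rest) (j + 4 - 2) ""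
      = PySem.List.pyGetD rest (j - 2) "" := by
    rw [show j + 4 - 2 = (((j - 2) + 1 + 1) + 1) + 1 by ring,
        pvGetD_cons (by omega), pvGetD_cons (by omega), pvGetD_cons (by omega), pvGetD_cons (by omega)]
  unfold pvStepB
  rw [hkey, hval]

theorem pvB_groups : ∀ (xs : List String) (d : PySem.Dict String String),
    (PySem.List.pyRange 2 xs.length 4).foldl (pvStepB xs) d = (pvGroups xs).foldl pvIns d
  | [], d => by rw [pvRange4_nil (by norm_num)]; rfl
  | [a], d => by rw [pvRange4_nil (by norm_num)]; rfl
  | [a, b], d => by rw [pvRange4_nil (by norm_num)]; rfl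
  | a :: b :: c :: e :: rest, d => by
    have hlen : ((a :: b :: c :: e :: rest).length : Int) = (rest.length : Int) + 4 := by
      simp; omega
    rw [pvRange4_cons (by rw [hlen]; omega), List.foldl_cons]
    have hshift : ∀ (d' : PySem.Dict String String),
        (PySem.List.pyRange 6 ((a :: b :: c :: e :: rest).length) 4).foldl
          (pvStepB (a :: b :: c :: e :: rest)) d'
        = (PySem.List.pyRange 2 rest.length 4).foldl (pvStepB rest) d' := by
      intro d'
      rw [hlen, show (6:Int) = 2 + 4 by norm_num,
          show ((rest.length : Int) + 4 = rest.length + 4) from rfl]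
      -- shift the range down by 4 and absorb the shift into the step function
      have : PySem.List.pyRange (2 + 4) ((rest.length : Int) + 4) 4
          = (PySem.List.pyRange 2 (rest.length : Int) 4).map (· + 4) := by
        rw [PySem.List.pyRange_of_pos 2 (rest.length : Int) (by norm_num),
            PySem.List.pyRange_of_pos (2 + 4) ((rest.length : Int) + 4) (by norm_num)]
        have hc : (if 2 + 4 < (rest.length : Int) + 4 then
              (((rest.length : Int) + 4 - (2 + 4) + 4 - 1) / 4).toNat else 0)
            = (if (2:Int) < (rest.length : Int) then
              (((rest.length : Int) - 2 + 4 - 1) / 4).toNat else 0) := by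
          split_ifs <;> omega
        rw [hc, List.map_map]
        apply List.map_congr_left; intros; simp; ring
      rw [this, List.foldl_map]
      apply PySem.List.foldl_congr_mem
      intro acc j hj
      have hj2 : 2 ≤ j := by
        rcases (PySem.List.mem_pyRange_iff_of_pos (by norm_num) j).mp hj with ⟨h1, _, _⟩
        exact h1
      exact pvStepB_shift4 a b c e rest acc j hj2
    have h3 : pvStepB (a :: b :: c :: e :: rest) d 2 = d.insert (pvKeyOf c) a := by
      unfold pvStepB
      norm_num [PySem.List.pyGetD, PySem.List.pyIdx?, PySem.List.pyGet?]
      rw [if_pos (by omega), if_pos (by omega)]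
      simp
    rw [show ((2:Int) + 4) = 6 by norm_num, hshift, h3, pvB_groups rest]
    rfl
  | [a, b, c], d => by
    have hlen : (([a, b, c] : List String).length : Int) = 3 := by simp
    rw [hlen, pvRange4_cons (by norm_num), pvRange4_nil (by norm_num), List.foldl_cons,
        List.foldl_nil]
    have h3 : pvStepB [a, b, c] d 2 = d.insert (pvKeyOf c) a := by
      unfold pvStepB
      norm_num [PySem.List.pyGetD, PySem.List.pyIdx?, PySem.List.pyGet?]
      rfl
    rw [h3]
    rfl

-- ===== VERDICT (by name: the statement is the Claim_ definition above) =====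
theorem create_genome_name_key_dictionary_spec : Claim_equal_create_genome_name_key_dictionary := by
  intro xs _
  show create_genome_name_key_dictionary xs = create_genome_name_key_dictionary_alt xs
  show (xs.foldl pvStepA (PySem.Dict.empty, 0, "")).1.items
      = ((PySem.List.pyRange 2 xs.length 4).foldl (pvStepB xs) PySem.Dict.empty).items
  rw [pvA_groups xs PySem.Dict.empty "", pvB_groups xs PySem.Dict.empty]
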